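-- pv_equiv track=rewrite | github.com/MrBrantCode/unitest_baseline | mut_generate/mist_train_cf/cf_57174/solution.py | count_divisible_cubes
-- ===== SOURCE A (Python) =====
-- def count_divisible_cubes(lower, upper):
--     cube_counts = {"total": 0, "divisible_by_6": 0}
--     for i in range(lower, upper):
--         cube = i ** 3
--         cube_counts["total"] += 1
--         if cube % 6 == 0:
--             cube_counts["divisible_by_6"] += 1
--     return cube_counts
-- ===== SOURCE B (Python) =====
-- def count_divisible_cubes(lower, upper):
--     # Closed form: i**3 % 6 == i % 6, so count multiples of 6 in [lower, upper).
--     if upper <= lower: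
--         return {"total": 0, "divisible_by_6": 0}
--     return {"total": upper - lower,
--             "divisible_by_6": (upper - 1) // 6 - (lower - 1) // 6}
-- ===== Notes on version B (the rewrite author's own statement) =====
-- stated objective: faster
-- what changed: Replaced the per-element loop (cube each i, test cube % 6) with a closed-form count: total = upper - lower and multiples of 6 counted by a floor-division difference, using i**3 % 6 == i % 6.
import Mathlib
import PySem

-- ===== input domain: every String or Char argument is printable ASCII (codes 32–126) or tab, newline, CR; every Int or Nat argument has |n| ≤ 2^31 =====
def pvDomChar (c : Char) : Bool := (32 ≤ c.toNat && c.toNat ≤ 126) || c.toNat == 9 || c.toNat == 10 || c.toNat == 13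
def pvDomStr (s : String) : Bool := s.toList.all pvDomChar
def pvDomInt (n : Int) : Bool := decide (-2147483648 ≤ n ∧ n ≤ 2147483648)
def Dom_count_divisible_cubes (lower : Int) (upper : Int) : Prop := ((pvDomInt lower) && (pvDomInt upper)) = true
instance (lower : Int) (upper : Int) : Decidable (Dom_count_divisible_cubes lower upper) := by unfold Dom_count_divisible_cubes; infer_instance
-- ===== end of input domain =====

-- B replaces A's per-element loop by an O(1) closed form (total = upper - lower; multiples
-- of 6 counted by a floor-division difference, since i**3 % 6 == i % 6); objective: faster.

-- ===== PORT A =====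
def count_divisible_cubes (lower : Int) (upper : Int) : List (String × Int) :=
  ((PySem.List.pyRange lower upper 1).foldl
    (fun cube_counts i =>
      let cube := i ^ 3
      let cube_counts := cube_counts.modify "total" 0 (· + 1)
      if PySem.Int.mod cube 6 = 0 then cube_counts.modify "divisible_by_6" 0 (· + 1)
      else cube_counts)
    (PySem.Dict.ofList [("total", 0), ("divisible_by_6", 0)])).items

-- ===== PORT B =====
def count_divisible_cubes_alt (lower : Int) (upper : Int) : List (String × Int) :=
  if upper ≤ lower then [("total", 0), ("divisible_by_6", 0)]
  else [("total", upper - lower),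
        ("divisible_by_6", PySem.Int.floordiv (upper - 1) 6 - PySem.Int.floordiv (lower - 1) 6)]

-- ===== PRECONDITION & SPEC =====
def Spec_count_divisible_cubes (lower : Int) (upper : Int) (out : List (String × Int)) : Prop := out = count_divisible_cubes_alt lower upper
instance (lower : Int) (upper : Int) (out : List (String × Int)) : Decidable (Spec_count_divisible_cubes lower upper out) := by unfold Spec_count_divisible_cubes; infer_instance

-- ===== CLAIM (what is proved, stated in full; the proofs are below) =====
def Claim_equal_count_divisible_cubes : Prop := ∀ (lower : Int) (upper : Int), Dom_count_divisible_cubes lower upper → Spec_count_divisible_cubes lower upper (count_divisible_cubes lower upper)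

-- ===== LEMMAS AND PROOFS =====

-- i³ % 6 = 0 exactly when 6 divides i (i³ ≡ i mod 6)
theorem pv_mod6_cube (i : Int) : PySem.Int.mod (i ^ 3) 6 = 0 ↔ (6 : Int) ∣ i := by
  rw [PySem.Int.mod_eq_emod_of_pos (by norm_num)]
  have hb : (i % 6) ≡ i [ZMOD 6] := Int.emod_emod_of_dvd i dvd_rfl
  have hc : (i % 6) ^ 3 % 6 = i ^ 3 % 6 := hb.pow 3
  have h : i ^ 3 % 6 = i % 6 := by
    rw [← hc]
    have h0 : 0 ≤ i % 6 := Int.emod_nonneg i (by norm_num)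
    have h1 : i % 6 < 6 := Int.emod_lt_of_pos i (by norm_num)
    set r := i % 6 with hr
    interval_cases r <;> norm_num
  rw [h]
  omega

-- one loop-body step on the two-key dict
theorem pv_step (t m i : Int) :
    (let cube := i ^ 3
     let d := (PySem.Dict.mk [("total", t), ("divisible_by_6", m)]).modify "total" 0 (· + 1)
     if PySem.Int.mod cube 6 = 0 then d.modify "divisible_by_6" 0 (· + 1) else d)
    = PySem.Dict.mk [("total", t + 1),
        ("divisible_by_6", m + if (6 : Int) ∣ i then 1 else 0)] := by
  by_cases h : (6 : Int) ∣ i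
  · simp only [pv_mod6_cube, h, if_pos]
    simp [PySem.Dict.modify, PySem.Dict.insert, PySem.Dict.getD, PySem.Dict.get?,
      PySem.Dict.contains]
  · simp only [pv_mod6_cube, h, if_false]
    simp [PySem.Dict.modify, PySem.Dict.insert, PySem.Dict.getD, PySem.Dict.get?,
      PySem.Dict.contains]

-- loop invariant: starting from counters (t, m), the fold adds the length of the range
-- to "total" and the number of multiples of 6 in [a, b) to "divisible_by_6"
theorem pv_loop (n : Nat) (a b t m : Int) (hn : (b - a).toNat = n) :
    (PySem.List.pyRange a b 1).foldl
      (fun cube_counts i =>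
        let cube := i ^ 3
        let cube_counts := cube_counts.modify "total" 0 (· + 1)
        if PySem.Int.mod cube 6 = 0 then cube_counts.modify "divisible_by_6" 0 (· + 1)
        else cube_counts)
      (PySem.Dict.mk [("total", t), ("divisible_by_6", m)])
    = PySem.Dict.mk [("total", t + ((b - a).toNat : Int)),
        ("divisible_by_6", m + if b ≤ a then 0
          else PySem.Int.floordiv (b - 1) 6 - PySem.Int.floordiv (a - 1) 6)] := by
  induction n generalizing a t m with
  | zero =>
      have hba : b ≤ a := by omega
      have h1 : t + ((b - a).toNat : Int) = t := by omega
      rw [PySem.List.pyRange_one_eq_nil hba]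
      simp only [List.foldl_nil, if_pos hba, h1, add_zero]
  | succ k ih =>
      have hab : a < b := by omega
      have h6 : (0 : Int) < 6 := by norm_num
      rw [PySem.List.pyRange_one_cons hab, List.foldl_cons, pv_step,
        ih (a + 1) (t + 1) _ (by omega)]
      simp only [PySem.Int.floordiv_eq_ediv_of_pos h6, PySem.Dict.mk.injEq,
        List.cons.injEq, Prod.mk.injEq]
      refine ⟨⟨trivial, by omega⟩, ⟨trivial, ?_⟩, trivial⟩
      split_ifs <;> omega

theorem pv_ofList_eq :
    PySem.Dict.ofList [("total", (0 : Int)), ("divisible_by_6", (0 : Int))]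
    = PySem.Dict.mk [("total", 0), ("divisible_by_6", 0)] := by decide

-- ===== VERDICT (by name: the statement is the Claim_ definition above) =====
theorem count_divisible_cubes_spec : Claim_equal_count_divisible_cubes := by
  intro lower upper _
  unfold Spec_count_divisible_cubes count_divisible_cubes count_divisible_cubes_alt
  rw [pv_ofList_eq, pv_loop (upper - lower).toNat lower upper 0 0 rfl]
  by_cases h : upper ≤ lower
  · have h1 : (0 : Int) + ((upper - lower).toNat : Int) = 0 := by omega
    simp only [if_pos h, h1, add_zero]
  · have h1 : (0 : Int) + ((upper - lower).toNat : Int) = upper - lower := by omega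
    simp only [if_neg h, h1, zero_add]
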